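-- pv_equiv track=rewrite | github.com/XuanShine/PyPlan | fails.py | search_personn1
-- ===== SOURCE A (Python) =====
-- def search_personn1(participants, planner):
--     nb_taches_for_personn = {}
--     for personn in participants:
--         if participants[personn]:
--             try:
--                 nb = len(planner[personn])
--             except KeyError:
--                 nb = 0
--             if not nb_taches_for_personn or \
--                nb <= min(nb_taches_for_personn.keys()):
--                 try:
--                     nb_taches_for_personn[nb].add(personn)
--                 except KeyError:
--                     nb_taches_for_personn[nb] = {personn}
--     try:
--         return nb_taches_for_personn[min(nb_taches_for_personn.keys())]
--     except ValueError:
--         return None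
-- ===== SOURCE B (Python) =====
-- def search_personn1(participants, planner):
--     best = None
--     result = None
--     for personn in participants:
--         if participants[personn]:
--             nb = len(planner.get(personn, ()))
--             if best is None or nb < best:
--                 best, result = nb, {personn}
--             elif nb == best:
--                 result.add(personn)
--     return result
-- ===== Notes on version B (the rewrite author's own statement) =====
-- stated objective: simpler
-- what changed: Replaces A's dict-of-sets keyed by task count (with a min() over its keys at every iteration and at the end) by a single pass keeping just the running minimum count and the set of participants attaining it.
import Mathlib
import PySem

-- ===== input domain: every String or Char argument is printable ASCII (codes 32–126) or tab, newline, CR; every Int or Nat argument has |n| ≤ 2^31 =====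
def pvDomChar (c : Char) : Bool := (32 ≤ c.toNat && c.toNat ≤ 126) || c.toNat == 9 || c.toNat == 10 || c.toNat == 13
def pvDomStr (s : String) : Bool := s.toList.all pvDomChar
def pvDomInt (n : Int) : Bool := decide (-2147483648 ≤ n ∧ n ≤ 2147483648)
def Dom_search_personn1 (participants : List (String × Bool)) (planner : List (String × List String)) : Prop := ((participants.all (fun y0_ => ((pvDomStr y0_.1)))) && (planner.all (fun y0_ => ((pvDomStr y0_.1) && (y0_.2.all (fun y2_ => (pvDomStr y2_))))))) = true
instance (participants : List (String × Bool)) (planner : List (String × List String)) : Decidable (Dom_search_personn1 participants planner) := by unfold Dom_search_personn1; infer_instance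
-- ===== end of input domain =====

-- B simplifies A: instead of a dict-of-sets keyed by task count (queried with min() over its
-- keys), B keeps just the running minimum count and the set of participants attaining it.

-- ===== PORT A =====
-- loop body of A: one participant key 'personn' updates the dict {nb -> set of names}
def pvStepA (participants : List (String × Bool)) (planner : List (String × List String))
    (d : PySem.Dict Int (PySem.Set String)) (pr : String × Bool) : PySem.Dict Int (PySem.Set String) :=
  let personn := pr.1
  -- participants[personn]: the key comes from iterating participants, so it is always present
  if PySem.Dict.getD (PySem.Dict.mk participants) personn false then
    -- nb = len(planner[personn]) with KeyError -> 0
    let nb : Int := ((PySem.Dict.getD (PySem.Dict.mk planner) personn []).length : Int)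
    -- if not d or nb <= min(d.keys())   (min of the empty list is never evaluated: short-circuit)
    let cond : Bool := (d.size == 0) ||
      (match PySem.List.min? (PySem.Dict.keys d) (fun x => x) with
       | some m => decide (nb ≤ m)
       | none => false)
    if cond then
      -- try: d[nb].add(personn)  except KeyError: d[nb] = {personn}
      match PySem.Dict.get? d nb with
      | some s => PySem.Dict.insert d nb (PySem.Set.add s personn)
      | none => PySem.Dict.insert d nb (PySem.Set.ofList [personn])
    else d
  else d

def search_personn1 (participants : List (String × Bool)) (planner : List (String × List String)) : Option (List String) :=
  let d := participants.foldl (pvStepA participants planner) PySem.Dict.empty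
  -- return d[min(d.keys())], ValueError (empty) -> None; the min key is always present, so get? is exact
  match PySem.List.min? (PySem.Dict.keys d) (fun x => x) with
  | some m => PySem.Dict.get? d m
  | none => none

-- ===== PORT B =====
-- loop body of B: track (best, result) = running minimum count and set of names attaining it
def pvStepB (participants : List (String × Bool)) (planner : List (String × List String))
    (st : Option Int × Option (PySem.Set String)) (pr : String × Bool) : Option Int × Option (PySem.Set String) :=
  let personn := pr.1
  if PySem.Dict.getD (PySem.Dict.mk participants) personn false then
    let nb : Int := ((PySem.Dict.getD (PySem.Dict.mk planner) personn []).length : Int)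
    match st with
    | (none, _) => (some nb, some (PySem.Set.ofList [personn]))
    | (some b, r) =>
      if nb < b then (some nb, some (PySem.Set.ofList [personn]))
      else if nb = b then (some b, r.map (fun s => PySem.Set.add s personn))
      else (some b, r)
  else st

def search_personn1_alt (participants : List (String × Bool)) (planner : List (String × List String)) : Option (List String) :=
  (participants.foldl (pvStepB participants planner) (none, none)).2

-- ===== PRECONDITION & SPEC =====
def Spec_search_personn1 (participants : List (String × Bool)) (planner : List (String × List String)) (out : Option (List String)) : Prop := out = search_personn1_alt participants planner
instance (participants : List (String × Bool)) (planner : List (String × List String)) (out : Option (List String)) : Decidable (Spec_search_personn1 participants planner out) := by unfold Spec_search_personn1; infer_instance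

-- ===== CLAIM (what is proved, stated in full; the proofs are below) =====
def Claim_equal_search_personn1 : Prop := ∀ (participants : List (String × Bool)) (planner : List (String × List String)), Dom_search_personn1 participants planner → Spec_search_personn1 participants planner (search_personn1 participants planner)

-- ===== LEMMAS AND PROOFS =====

-- loop invariant: A's dict is empty iff B has seen nobody; otherwise B's best is the minimum key
-- of A's dict and B's result is the set stored there.
def pvInv (d : PySem.Dict Int (PySem.Set String)) (st : Option Int × Option (PySem.Set String)) : Prop :=
  (st = (none, none) ∧ d = PySem.Dict.empty) ∨
  (∃ m s, st = (some m, some s) ∧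
    PySem.List.min? (PySem.Dict.keys d) (fun x => x) = some m ∧
    PySem.Dict.get? d m = some s)

lemma pvMin?_append_lt (xs : List Int) (m nb : Int)
    (h : PySem.List.min? xs (fun x => x) = some m) (hlt : nb < m) :
    PySem.List.min? (xs ++ [nb]) (fun x => x) = some nb := by
  cases xs with
  | nil => simp [PySem.List.min?] at h
  | cons x t =>
    rw [PySem.List.min?_id_cons] at h
    rw [List.cons_append, PySem.List.min?_id_cons, List.foldl_append]
    simp only [List.foldl_cons, List.foldl_nil]
    rw [Option.some_inj] at h
    rw [h, min_eq_right hlt.le]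

lemma pvStep_inv (P : List (String × Bool)) (pl : List (String × List String))
    (d : PySem.Dict Int (PySem.Set String)) (st : Option Int × Option (PySem.Set String))
    (pr : String × Bool) (h : pvInv d st) : pvInv (pvStepA P pl d pr) (pvStepB P pl st pr) := by
  unfold pvStepA pvStepB
  by_cases hact : PySem.Dict.getD (PySem.Dict.mk P) pr.1 false
  · simp only [hact, if_true]
    set nb : Int := ((PySem.Dict.getD (PySem.Dict.mk pl) pr.1 []).length : Int) with hnb
    rcases h with ⟨hst, hd⟩ | ⟨m, s, hst, hmin, hget⟩
    · subst hd; rw [hst]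
      simp only [PySem.Dict.size_empty, beq_self_eq_true, Bool.true_or, if_true,
        PySem.Dict.get?_empty]
      right
      refine ⟨nb, PySem.Set.ofList [pr.1], rfl, ?_, PySem.Dict.get?_insert_self _ _ _⟩
      rw [PySem.Dict.keys_insert_of_not_contains _ _ (by
            rw [← PySem.Dict.get?_eq_none_iff_contains]; exact PySem.Dict.get?_empty _),
        PySem.Dict.keys_empty, List.nil_append, PySem.List.min?_id_cons]
      rfl
    · rw [hst]
      have hmem : m ∈ PySem.Dict.keys d := PySem.List.min?_mem hmin
      have hsz : (d.size == 0) = false := by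
        have hne : PySem.Dict.keys d ≠ [] := List.ne_nil_of_mem hmem
        have hit : d.items ≠ [] := by
          intro hnil; apply hne
          simp only [PySem.Dict.keys, hnil, List.map_nil]
        simp only [PySem.Dict.size, beq_eq_false_iff_ne, ne_eq, List.length_eq_zero_iff]
        exact hit
      simp only [hsz, hmin, Bool.false_or]
      by_cases hlt : nb < m
      · -- strictly smaller count: A appends a fresh key nb, B resets
        have hnc : d.contains nb = false := by
          rw [Bool.eq_false_iff]
          intro hc
          have := PySem.List.min?_isMin hmin nb ((PySem.Dict.contains_iff_mem_keys d nb).1 hc)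
          omega
        have hnone : PySem.Dict.get? d nb = none :=
          (PySem.Dict.get?_eq_none_iff_contains d nb).2 hnc
        have hle : decide (nb ≤ m) = true := by simp [hlt.le]
        simp only [hle, if_true, hnone, if_pos hlt]
        right
        refine ⟨nb, PySem.Set.ofList [pr.1], rfl, ?_, PySem.Dict.get?_insert_self _ _ _⟩
        rw [PySem.Dict.keys_insert_of_not_contains _ _ hnc]
        exact pvMin?_append_lt _ m nb hmin hlt
      · by_cases heq : nb = m
        · -- equal count: A adds to the set at key m, B adds to result
          subst heq
          have hle : decide (nb ≤ nb) = true := by simp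
          simp only [hle, if_true, hget, if_neg (lt_irrefl nb), Option.map_some]
          right
          refine ⟨nb, PySem.Set.add s pr.1, rfl, ?_, PySem.Dict.get?_insert_self _ _ _⟩
          rw [PySem.Dict.keys_insert_of_contains _ _ (by
            rw [PySem.Dict.contains_iff_mem_keys]; exact hmem)]
          exact hmin
        · -- larger count: both sides skip
          have hle : decide (nb ≤ m) = false := by simp; omega
          simp only [hle, Bool.false_eq_true, if_false, if_neg hlt, if_neg heq]
          right; exact ⟨m, s, rfl, hmin, hget⟩
  · simp only [hact, Bool.false_eq_true, if_false]; exact h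

lemma pvFold_inv (P : List (String × Bool)) (pl : List (String × List String))
    (l : List (String × Bool)) (d : PySem.Dict Int (PySem.Set String))
    (st : Option Int × Option (PySem.Set String)) (h : pvInv d st) :
    pvInv (l.foldl (pvStepA P pl) d) (l.foldl (pvStepB P pl) st) := by
  induction l generalizing d st with
  | nil => exact h
  | cons x t ih => exact ih _ _ (pvStep_inv P pl d st x h)

-- ===== VERDICT (by name: the statement is the Claim_ definition above) =====
theorem search_personn1_spec : Claim_equal_search_personn1 := by
  intro participants planner _
  unfold Spec_search_personn1 search_personn1 search_personn1_alt
  have h := pvFold_inv participants planner participants PySem.Dict.empty (none, none)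
    (Or.inl ⟨rfl, rfl⟩)
  rcases h with ⟨hst, hd⟩ | ⟨m, s, hst, hmin, hget⟩
  · rw [hst, hd]
    simp only [PySem.Dict.keys_empty]
    rfl
  · rw [hst]
    simp only [hmin, hget]
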